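-- pv_equiv track=rewrite | github.com/ksmrdn/Module01_Python | Course_Module01/py6.py | ubahvokal
-- ===== SOURCE A (Python) =====
-- def ubahvokal(kata):
--     output = ''
--     for Huruf in kata:
--         if Huruf in 'aiueo':
--             output = output + output
--         else:
--             output= output + Huruf
--     return output
-- ===== SOURCE B (Python) =====
-- def ubahvokal(kata):
--     # Segment the string at vowels, then fold over the segments:
--     # each vowel doubles the string built so far, each consonant run is appended.
--     segs = []
--     cur = []
--     for c in kata:
--         if c in 'aiueo':
--             segs.append(''.join(cur))
--             cur = []
--         else:
--             cur.append(c)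
--     segs.append(''.join(cur))
--     h = segs[0]
--     for s in segs[1:]:
--         h = h + h + s
--     return h
-- ===== Notes on version B (the rewrite author's own statement) =====
-- stated objective: alternative
-- what changed: Instead of accumulating the output char-by-char (doubling on each vowel), B first splits the input into consonant segments delimited by vowels and then folds h = h + h + seg over the segments; consonant runs are built as lists and joined once.
import Mathlib
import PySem

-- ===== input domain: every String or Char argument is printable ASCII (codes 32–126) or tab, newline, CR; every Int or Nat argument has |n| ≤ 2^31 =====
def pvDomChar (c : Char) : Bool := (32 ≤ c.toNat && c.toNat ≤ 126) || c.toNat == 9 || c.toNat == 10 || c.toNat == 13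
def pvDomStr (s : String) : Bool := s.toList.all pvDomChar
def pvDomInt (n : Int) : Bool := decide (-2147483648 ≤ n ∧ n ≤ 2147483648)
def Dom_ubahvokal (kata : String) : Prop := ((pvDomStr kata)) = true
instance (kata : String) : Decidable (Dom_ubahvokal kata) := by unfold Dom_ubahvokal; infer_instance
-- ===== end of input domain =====

-- B splits the input into consonant segments delimited by vowels and folds h = h + h + seg over them,
-- instead of A's char-by-char accumulation; an alternative decomposition, not claimed faster.


-- ===== PORT A =====
-- A: output = ''; for Huruf in kata: output = output+output on vowels, else output+Huruf
def ubahvokal (kata : String) : String :=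
  String.mk (kata.toList.foldl
    (fun out Huruf => if Huruf ∈ ['a', 'i', 'u', 'e', 'o'] then out ++ out else out ++ [Huruf])
    [])

-- ===== PORT B =====
-- B step 1: build (segs, cur) — segs = consonant runs before each vowel, cur = run being built
def ubahvokalSeg (p : List (List Char) × List Char) (c : Char) : List (List Char) × List Char :=
  if c ∈ ['a', 'i', 'u', 'e', 'o'] then (p.1 ++ [p.2], []) else (p.1, p.2 ++ [c])

def ubahvokal_alt (kata : String) : String :=
  let p := kata.toList.foldl ubahvokalSeg ([], [])
  let segs := p.1 ++ [p.2]
  String.mk (segs.tail.foldl (fun h s => h ++ h ++ s) (segs.headD []))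

-- ===== PRECONDITION & SPEC =====
def Spec_ubahvokal (kata : String) (out : String) : Prop := out = ubahvokal_alt kata
instance (kata : String) (out : String) : Decidable (Spec_ubahvokal kata out) := by unfold Spec_ubahvokal; infer_instance

-- ===== CLAIM (what is proved, stated in full; the proofs are below) =====
def Claim_equal_ubahvokal : Prop := ∀ (kata : String), Dom_ubahvokal kata → Spec_ubahvokal kata (ubahvokal kata)

-- ===== LEMMAS AND PROOFS =====

-- reference segmentation, recursive on the list
def splitV : List Char → List (List Char)
  | [] => [[]]
  | c :: l =>
    if c ∈ ['a', 'i', 'u', 'e', 'o'] then [] :: splitV l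
    else match splitV l with
      | s :: rest => (c :: s) :: rest
      | [] => [[c]]

theorem splitV_ne_nil (l : List Char) : splitV l ≠ [] := by
  cases l with
  | nil => simp [splitV]
  | cons c l =>
    simp only [splitV]
    split
    · simp
    · split <;> simp

-- prepend cur to the head segment
def consHead (cur : List Char) : List (List Char) → List (List Char)
  | s :: rest => (cur ++ s) :: rest
  | [] => [cur]

theorem consHead_nil (xs : List (List Char)) (h : xs ≠ []) : consHead [] xs = xs := by
  cases xs with
  | nil => exact absurd rfl h
  | cons s rest => simp [consHead]

-- the segment-building fold computes splitV (with cur merged into the head and segs prepended)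
theorem foldSeg_eq (l : List Char) : ∀ (segs : List (List Char)) (cur : List Char),
    (l.foldl ubahvokalSeg (segs, cur)).1 ++ [(l.foldl ubahvokalSeg (segs, cur)).2]
      = segs ++ consHead cur (splitV l) := by
  induction l with
  | nil => intro segs cur; simp [splitV, consHead]
  | cons c l ih =>
    intro segs cur
    by_cases hc : c ∈ ['a', 'i', 'u', 'e', 'o']
    · simp only [List.foldl_cons, ubahvokalSeg, if_pos hc, splitV]
      rw [ih]
      rw [consHead_nil _ (splitV_ne_nil l)]
      simp [consHead]
    · simp only [List.foldl_cons, ubahvokalSeg, if_neg hc, splitV]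
      rw [ih]
      cases h : splitV l with
      | nil => exact absurd h (splitV_ne_nil l)
      | cons s rest => simp [consHead]

-- A's fold equals the segment fold over splitV
theorem foldA_eq (l : List Char) : ∀ (acc : List Char),
    l.foldl (fun out Huruf => if Huruf ∈ ['a', 'i', 'u', 'e', 'o'] then out ++ out else out ++ [Huruf]) acc
      = (splitV l).tail.foldl (fun h s => h ++ h ++ s) (acc ++ (splitV l).headD []) := by
  induction l with
  | nil => intro acc; simp [splitV]
  | cons c l ih =>
    intro acc
    by_cases hc : c ∈ ['a', 'i', 'u', 'e', 'o']
    · simp only [List.foldl_cons, if_pos hc, splitV]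
      rw [ih]
      cases h : splitV l with
      | nil => exact absurd h (splitV_ne_nil l)
      | cons s rest => simp
    · simp only [List.foldl_cons, if_neg hc, splitV]
      rw [ih]
      cases h : splitV l with
      | nil => exact absurd h (splitV_ne_nil l)
      | cons s rest => simp

-- ===== VERDICT (by name: the statement is the Claim_ definition above) =====
theorem ubahvokal_spec : Claim_equal_ubahvokal := by
  intro kata _
  unfold Spec_ubahvokal ubahvokal ubahvokal_alt
  have h := foldSeg_eq kata.toList [] []
  simp only [List.nil_append] at h
  rw [consHead_nil _ (splitV_ne_nil kata.toList)] at h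
  simp only [foldA_eq kata.toList [], h, List.nil_append]
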